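-- pv_equiv track=rewrite | github.com/RedContritio/TheFarmerWasReplaced-scripts | utils_rect_ex.py | rectangle_merge_all
-- ===== SOURCE A (Python) =====
-- def rectangles_adjacent(rect1, rect2):
--     # 判断两个矩形是否相邻（可合并）
--     y1, x1, h1, w1 = rect1
--     y2, x2, h2, w2 = rect2
--
--     # 有效性检查
--     if h1 <= 0 or w1 <= 0 or h2 <= 0 or w2 <= 0:
--         return False
--
--     # 水平相邻且高度相同
--     if y1 == y2 and h1 == h2:
--         if x1 + w1 == x2 or x2 + w2 == x1:
--             return True
--
--     # 垂直相邻且宽度相同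
--     if x1 == x2 and w1 == w2:
--         if y1 + h1 == y2 or y2 + h2 == y1:
--             return True
--
--     return False
--
-- def rectangle_merge(rect1, rect2):
--     # 合并两个相邻矩形
--     # 前提：rectangles_adjacent(rect1, rect2) == True
--     y1, x1, h1, w1 = rect1
--     y2, x2, h2, w2 = rect2
--
--     # 水平相邻
--     if y1 == y2 and h1 == h2:
--         new_x = x1
--         if x2 < x1:
--             new_x = x2
--         new_w = w1 + w2
--         return (y1, new_x, h1, new_w)
--
--     # 垂直相邻
--     new_y = y1
--     if y2 < y1:
--         new_y = y2
--     new_h = h1 + h2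
--     return (new_y, x1, new_h, w1)
--
-- def rectangle_merge_all(rects):
--     # 合并列表中所有相邻矩形
--     if len(rects) <= 1:
--         # 创建副本返回
--         result = []
--         for rect in rects:
--             result.append(rect)
--         return result
--
--     # 工作列表
--     work_list = []
--     for rect in rects:
--         work_list.append(rect)
--
--     merged = True
--     while merged and len(work_list) > 1:
--         merged = False
--         new_list = []
--
--         while len(work_list) > 0:
--             current = work_list.pop(0)
--             found_merge = False
--
--             # 尝试与后续矩形合并
--             i = 0
--             while i < len(work_list):
--                 other = work_list[i]
--                 # 检查是否相邻
--                 if rectangles_adjacent(current, other):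
--                     merged_rect = rectangle_merge(current, other)
--                     if merged_rect != None:
--                         # 成功合并
--                         work_list.pop(i)
--                         new_list.append(merged_rect)
--                         found_merge = True
--                         merged = True
--                         break
--                 i += 1
--
--             if not found_merge:
--                 new_list.append(current)
--
--         work_list = new_list
--
--     return work_list
-- ===== SOURCE B (Python) =====
-- def rectangles_adjacent(rect1, rect2):
--     y1, x1, h1, w1 = rect1
--     y2, x2, h2, w2 = rect2
--     if h1 <= 0 or w1 <= 0 or h2 <= 0 or w2 <= 0:
--         return False
--     if y1 == y2 and h1 == h2:
--         if x1 + w1 == x2 or x2 + w2 == x1: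
--             return True
--     if x1 == x2 and w1 == w2:
--         if y1 + h1 == y2 or y2 + h2 == y1:
--             return True
--     return False
--
--
-- def rectangle_merge(rect1, rect2):
--     y1, x1, h1, w1 = rect1
--     y2, x2, h2, w2 = rect2
--     if y1 == y2 and h1 == h2:
--         new_x = x1
--         if x2 < x1:
--             new_x = x2
--         return (y1, new_x, h1, w1 + w2)
--     new_y = y1
--     if y2 < y1:
--         new_y = y2
--     return (new_y, x1, h1 + h2, w1)
--
--
-- def _merge_pass(lst):
--     # One non-destructive pass: walk indices left to right over a fixed list,
--     # marking partners as consumed instead of popping them.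
--     n = len(lst)
--     used = [False] * n
--     result = []
--     for j in range(n):
--         if used[j]:
--             continue
--         cur = lst[j]
--         for i in range(j + 1, n):
--             if not used[i] and rectangles_adjacent(cur, lst[i]):
--                 used[i] = True
--                 cur = rectangle_merge(cur, lst[i])
--                 break
--         result.append(cur)
--     return result
--
--
-- def rectangle_merge_all(rects):
--     out = list(rects)
--     while len(out) > 1:
--         nxt = _merge_pass(out)
--         if len(nxt) == len(out):
--             break
--         out = nxt
--     return out
-- ===== Notes on version B (the rewrite author's own statement) =====
-- stated objective: alternative
-- what changed: Replaces A's destructive worklist (pop(0) per element, pop(i) for the merge partner, mutated across nested while loops with a merged flag) by non-destructive left-to-right index passes over a fixed list with a consumed-marker array, iterated to a fixpoint detected by the pass not shrinking the list.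
import Mathlib
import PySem

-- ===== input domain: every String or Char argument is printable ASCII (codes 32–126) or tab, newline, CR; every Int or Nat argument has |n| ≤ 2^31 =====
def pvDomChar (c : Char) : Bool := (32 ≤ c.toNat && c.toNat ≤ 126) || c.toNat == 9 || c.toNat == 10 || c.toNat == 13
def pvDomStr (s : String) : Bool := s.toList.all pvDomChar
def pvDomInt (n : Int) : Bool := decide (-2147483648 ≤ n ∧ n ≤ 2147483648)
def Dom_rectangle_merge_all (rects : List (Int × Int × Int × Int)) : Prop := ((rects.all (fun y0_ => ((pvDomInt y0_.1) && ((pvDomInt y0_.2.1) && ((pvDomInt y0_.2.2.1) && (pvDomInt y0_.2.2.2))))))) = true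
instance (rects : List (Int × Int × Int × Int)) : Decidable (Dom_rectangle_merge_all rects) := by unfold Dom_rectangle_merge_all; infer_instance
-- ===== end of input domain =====

-- B replaces A's destructive worklist (pop(0)/pop(i) across nested while loops
-- with a merged flag) by non-destructive index passes over a fixed list with a
-- consumed-marker array, iterated until a pass stops shrinking the list
-- (objective: alternative; same results, no speed claim).

-- ===== PORT A =====

-- shared module helpers (identical source in Source A and Source B)
def rectangles_adjacent (r1 r2 : Int × Int × Int × Int) : Bool :=
  let (y1, x1, h1, w1) := r1
  let (y2, x2, h2, w2) := r2
  if h1 ≤ 0 || w1 ≤ 0 || h2 ≤ 0 || w2 ≤ 0 then false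
  else if y1 == y2 && h1 == h2 && (x1 + w1 == x2 || x2 + w2 == x1) then true
  else if x1 == x2 && w1 == w2 && (y1 + h1 == y2 || y2 + h2 == y1) then true
  else false

def rectangle_merge (r1 r2 : Int × Int × Int × Int) : Int × Int × Int × Int :=
  let (y1, x1, h1, w1) := r1
  let (y2, x2, h2, w2) := r2
  if y1 == y2 && h1 == h2 then
    let new_x := if x2 < x1 then x2 else x1
    (y1, new_x, h1, w1 + w2)
  else
    let new_y := if y2 < y1 then y2 else y1
    (new_y, x1, h1 + h2, w1)

-- A's inner while loop: scan work_list with index i for the first adjacent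
-- rectangle, returning its index and the element ('other')
def scanAdjA (cur : Int × Int × Int × Int) :
    List (Int × Int × Int × Int) → Option (Nat × (Int × Int × Int × Int))
  | [] => none
  | o :: rest =>
      if rectangles_adjacent cur o then some (0, o)
      else (scanAdjA cur rest).map (fun p => (p.1 + 1, p.2))

-- A's middle while loop: one pass over work_list (pop(0) = head, pop(i) = eraseIdx),
-- returning new_list and the merged flag; the fuel argument only makes the
-- recursion structural (fuel ≥ work_list length is always sufficient)
def passA : Nat → List (Int × Int × Int × Int) → List (Int × Int × Int × Int) × Bool
  | _, [] => ([], false)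
  | 0, l => (l, false)   -- unreachable with fuel ≥ length
  | fuel + 1, c :: rest =>
      match scanAdjA c rest with
      | some (i, o) =>
          let p := passA fuel (rest.eraseIdx i)
          (rectangle_merge c o :: p.1, true)
      | none =>
          let p := passA fuel rest
          (c :: p.1, p.2)

-- A's outer while loop: repeat passes while the merged flag is set and len > 1;
-- the fuel only makes it structural (each continued pass shrinks the list, so
-- fuel = initial length is always sufficient)
def loopA : Nat → List (Int × Int × Int × Int) → List (Int × Int × Int × Int)
  | 0, wl => wl   -- unreachable with sufficient fuel
  | fuel + 1, wl =>
      if wl.length ≤ 1 then wl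
      else
        match passA wl.length wl with
        | (nl, true) => loopA fuel nl
        | (nl, false) => nl

def rectangle_merge_all (rects : List (Int × Int × Int × Int)) : List (Int × Int × Int × Int) :=
  if rects.length ≤ 1 then rects else loopA rects.length rects

-- ===== PORT B =====

-- Source B inner for-loop over i in range(j+1, n) (the index list js): first index
-- that is not consumed and adjacent to cur
def findAdjB (lst : List (Int × Int × Int × Int)) (used : List Bool)
    (cur : Int × Int × Int × Int) : List Nat → Option Nat
  | [] => none
  | i :: is =>
      if !(used.getD i false) && rectangles_adjacent cur (lst.getD i (0, 0, 0, 0)) then some i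
      else findAdjB lst used cur is

-- Source B outer for-loop over j in range(n), building result front to back
def passBgo (lst : List (Int × Int × Int × Int)) (used : List Bool) :
    List Nat → List (Int × Int × Int × Int)
  | [] => []
  | j :: js =>
      if used.getD j false then passBgo lst used js
      else
        let cur := lst.getD j (0, 0, 0, 0)
        match findAdjB lst used cur js with
        | some i => rectangle_merge cur (lst.getD i (0, 0, 0, 0)) :: passBgo lst (used.set i true) js
        | none => cur :: passBgo lst used js

def passB (lst : List (Int × Int × Int × Int)) : List (Int × Int × Int × Int) :=
  passBgo lst (List.replicate lst.length false) (List.range lst.length)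

-- Source B while loop: repeat passes until the pass does not shrink the list; the
-- fuel only makes it structural (every continued pass shrinks, so fuel =
-- initial length is always sufficient)
def loopB : Nat → List (Int × Int × Int × Int) → List (Int × Int × Int × Int)
  | 0, out => out   -- unreachable with sufficient fuel
  | fuel + 1, out =>
      if out.length ≤ 1 then out
      else
        let nxt := passB out
        if nxt.length = out.length then out else loopB fuel nxt

def rectangle_merge_all_alt (rects : List (Int × Int × Int × Int)) : List (Int × Int × Int × Int) :=
  loopB rects.length rects

-- ===== PRECONDITION & SPEC =====
def Spec_rectangle_merge_all (rects : List (Int × Int × Int × Int)) (out : List (Int × Int × Int × Int)) : Prop := out = rectangle_merge_all_alt rects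
instance (rects : List (Int × Int × Int × Int)) (out : List (Int × Int × Int × Int)) : Decidable (Spec_rectangle_merge_all rects out) := by unfold Spec_rectangle_merge_all; infer_instance

-- ===== CLAIM (what is proved, stated in full; the proofs are below) =====
def Claim_equal_rectangle_merge_all : Prop := ∀ (rects : List (Int × Int × Int × Int)), Dom_rectangle_merge_all rects → Spec_rectangle_merge_all rects (rectangle_merge_all rects)

-- ===== LEMMAS AND PROOFS =====

theorem scanAdjA_lt (cur : Int × Int × Int × Int) (l : List (Int × Int × Int × Int))
    (i : Nat) (o : Int × Int × Int × Int) (h : scanAdjA cur l = some (i, o)) :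
    i < l.length := by
  induction l generalizing i o with
  | nil => simp [scanAdjA] at h
  | cons a rest ih =>
      simp only [scanAdjA] at h
      split at h
      · simp only [Option.some.injEq, Prod.mk.injEq] at h
        obtain ⟨h1, h2⟩ := h
        simp [← h1]
      · match hr : scanAdjA cur rest with
        | none => rw [hr] at h; simp at h
        | some (i', o') =>
            rw [hr] at h
            simp only [Option.map_some, Option.some.injEq, Prod.mk.injEq] at h
            obtain ⟨h1, h2⟩ := h
            have := ih i' o' hr
            simp only [List.length_cons]
            omega

-- passA ignores the exact fuel as long as it covers the list length
theorem passA_congr (f1 : Nat) : ∀ (f2 : Nat) (l : List (Int × Int × Int × Int)),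
    l.length ≤ f1 → l.length ≤ f2 → passA f1 l = passA f2 l := by
  induction f1 with
  | zero =>
      intro f2 l h1 _
      have : l = [] := List.eq_nil_of_length_eq_zero (by omega)
      subst this
      cases f2 <;> rfl
  | succ f1 ih =>
      intro f2 l h1 h2
      match l with
      | [] => cases f2 <;> rfl
      | c :: rest =>
          match f2 with
          | 0 => simp at h2
          | f2 + 1 =>
              simp only [passA]
              match hs : scanAdjA c rest with
              | some (i, o) =>
                  have hi : i < rest.length := scanAdjA_lt _ _ _ _ hs
                  have hl : (rest.eraseIdx i).length ≤ f1 := by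
                    have := List.length_eraseIdx_of_lt hi
                    simp only [List.length_cons] at h1; omega
                  have hl2 : (rest.eraseIdx i).length ≤ f2 := by
                    have := List.length_eraseIdx_of_lt hi
                    simp only [List.length_cons] at h2; omega
                  show (rectangle_merge c o :: (passA f1 (rest.eraseIdx i)).1, true)
                    = (rectangle_merge c o :: (passA f2 (rest.eraseIdx i)).1, true)
                  rw [ih f2 (rest.eraseIdx i) hl hl2]
              | none =>
                  have hl : rest.length ≤ f1 := by simp only [List.length_cons] at h1; omega
                  have hl2 : rest.length ≤ f2 := by simp only [List.length_cons] at h2; omega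
                  show (c :: (passA f1 rest).1, (passA f1 rest).2)
                    = (c :: (passA f2 rest).1, (passA f2 rest).2)
                  rw [ih f2 rest hl hl2]

theorem passA_len_le (fuel : Nat) : ∀ l : List (Int × Int × Int × Int),
    l.length ≤ fuel → (passA fuel l).1.length ≤ l.length := by
  induction fuel with
  | zero =>
      intro l h
      have : l = [] := List.eq_nil_of_length_eq_zero (by omega)
      subst this; simp [passA]
  | succ fuel ih =>
      intro l h
      match l with
      | [] => simp [passA]
      | c :: rest =>
          simp only [passA]
          match hs : scanAdjA c rest with
          | some (i, o) =>
              have hi : i < rest.length := scanAdjA_lt _ _ _ _ hs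
              have he := List.length_eraseIdx_of_lt hi
              have := ih (rest.eraseIdx i) (by simp only [List.length_cons] at h; omega)
              simp only [List.length_cons]
              omega
          | none =>
              have := ih rest (by simp only [List.length_cons] at h; omega)
              simp only [List.length_cons]
              omega

theorem passA_true_lt (fuel : Nat) : ∀ l : List (Int × Int × Int × Int),
    l.length ≤ fuel → (passA fuel l).2 = true → (passA fuel l).1.length < l.length := by
  induction fuel with
  | zero =>
      intro l hl h
      have : l = [] := List.eq_nil_of_length_eq_zero (by omega)
      subst this; simp [passA] at h
  | succ fuel ih =>
      intro l hl h
      match l with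
      | [] => simp [passA] at h
      | c :: rest =>
          simp only [passA] at h ⊢
          match hs : scanAdjA c rest with
          | some (i, o) =>
              have hi : i < rest.length := scanAdjA_lt _ _ _ _ hs
              have he := List.length_eraseIdx_of_lt hi
              have := passA_len_le fuel (rest.eraseIdx i)
                (by simp only [List.length_cons] at hl; omega)
              simp only [List.length_cons]
              omega
          | none =>
              rw [hs] at h
              have := ih rest (by simp only [List.length_cons] at hl; omega) h
              simp only [List.length_cons]
              omega

theorem passA_false_eq (fuel : Nat) : ∀ l : List (Int × Int × Int × Int),
    l.length ≤ fuel → (passA fuel l).2 = false → (passA fuel l).1 = l := by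
  induction fuel with
  | zero =>
      intro l hl h
      have : l = [] := List.eq_nil_of_length_eq_zero (by omega)
      subst this; simp [passA]
  | succ fuel ih =>
      intro l hl h
      match l with
      | [] => simp [passA]
      | c :: rest =>
          simp only [passA] at h ⊢
          match hs : scanAdjA c rest with
          | some (i, o) => rw [hs] at h; simp at h
          | none =>
              rw [hs] at h
              rw [ih rest (by simp only [List.length_cons] at hl; omega) h]

-- the rectangles of lst with index ≥ j not yet consumed, in order: this is
-- exactly A's residual work_list when B's pass has reached index j
def remFrom (lst : List (Int × Int × Int × Int)) (used : List Bool) (j : Nat) :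
    List (Int × Int × Int × Int) :=
  if j < lst.length then
    (if used.getD j false then [] else [lst.getD j (0, 0, 0, 0)]) ++ remFrom lst used (j + 1)
  else []
  termination_by lst.length - j

theorem remFrom_stop (lst : List (Int × Int × Int × Int)) (used : List Bool) (j : Nat)
    (h : ¬ j < lst.length) : remFrom lst used j = [] := by
  rw [remFrom, if_neg h]

theorem remFrom_skip (lst : List (Int × Int × Int × Int)) (used : List Bool) (j : Nat)
    (hj : j < lst.length) (hu : used.getD j false = true) :
    remFrom lst used j = remFrom lst used (j + 1) := by
  rw [remFrom, if_pos hj, hu, if_pos rfl, List.nil_append]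

theorem remFrom_cons (lst : List (Int × Int × Int × Int)) (used : List Bool) (j : Nat)
    (hj : j < lst.length) (hu : used.getD j false = false) :
    remFrom lst used j = lst.getD j (0, 0, 0, 0) :: remFrom lst used (j + 1) := by
  rw [remFrom, if_pos hj, hu, if_neg (by simp), List.singleton_append]

theorem remFrom_len_le (lst : List (Int × Int × Int × Int)) (used : List Bool) (j : Nat) :
    (remFrom lst used j).length ≤ lst.length - j := by
  induction hi : lst.length - j generalizing j with
  | zero => rw [remFrom_stop _ _ _ (by omega)]; simp
  | succ m ih =>
      have hj : j < lst.length := by omega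
      have := ih (j + 1) (by omega)
      cases hu : used.getD j false with
      | true => rw [remFrom_skip _ _ _ hj hu]; omega
      | false => rw [remFrom_cons _ _ _ hj hu]; simp only [List.length_cons]; omega

theorem getD_set_ne (used : List Bool) (k j : Nat) (h : k ≠ j) :
    (used.set k true).getD j false = used.getD j false := by
  rw [List.getD, List.getD, List.getElem?_set_ne h]

theorem remFrom_set_lt (lst : List (Int × Int × Int × Int)) (used : List Bool)
    (k j : Nat) (hk : k < j) :
    remFrom lst (used.set k true) j = remFrom lst used j := by
  induction hi : lst.length - j generalizing j with
  | zero =>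
      rw [remFrom_stop _ _ _ (by omega), remFrom_stop _ _ _ (by omega)]
  | succ m ih =>
      have hj : j < lst.length := by omega
      have hg := getD_set_ne used k j (by omega)
      cases hu : used.getD j false with
      | true =>
          rw [remFrom_skip _ _ _ hj (hg.trans hu), remFrom_skip _ _ _ hj hu,
            ih (j + 1) (by omega) (by omega)]
      | false =>
          rw [remFrom_cons _ _ _ hj (hg.trans hu), remFrom_cons _ _ _ hj hu,
            ih (j + 1) (by omega) (by omega)]

-- scan correspondence: B's find over the remaining index list equals A's scan
-- of the residual work_list
theorem scan_corr (lst : List (Int × Int × Int × Int)) (used : List Bool)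
    (cur : Int × Int × Int × Int) (i : Nat) (hlen : used.length = lst.length) :
    (findAdjB lst used cur (List.range' i (lst.length - i)) = none ∧
      scanAdjA cur (remFrom lst used i) = none) ∨
    (∃ k pos, findAdjB lst used cur (List.range' i (lst.length - i)) = some k ∧
      i ≤ k ∧ k < lst.length ∧
      scanAdjA cur (remFrom lst used i) = some (pos, lst.getD k (0, 0, 0, 0)) ∧
      (remFrom lst used i).eraseIdx pos = remFrom lst (used.set k true) i) := by
  induction hi : lst.length - i generalizing i with
  | zero =>
      left
      rw [List.range'_zero, remFrom_stop _ _ _ (by omega)]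
      exact ⟨rfl, rfl⟩
  | succ m ih =>
      have hj : i < lst.length := by omega
      rw [List.range'_succ]
      simp only [findAdjB]
      have hm : lst.length - (i + 1) = m := by omega
      cases hu : used.getD i false with
      | true =>
          simp only [Bool.not_true, Bool.false_and, if_neg (by simp : ¬ (false = true))]
          rw [remFrom_skip _ _ _ hj hu]
          rcases ih (i + 1) (by omega) with ⟨h1, h2⟩ | ⟨k, pos, h1, hk1, hk2, h3, h4⟩
          · exact Or.inl ⟨h1, h2⟩
          · right
            refine ⟨k, pos, h1, by omega, hk2, h3, ?_⟩
            rw [h4,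
              remFrom_skip _ (used.set k true) _ hj ((getD_set_ne used k i (by omega)).trans hu)]
      | false =>
          simp only [Bool.not_false, Bool.true_and]
          rw [remFrom_cons _ _ _ hj hu]
          by_cases ha : rectangles_adjacent cur (lst.getD i (0, 0, 0, 0))
          · right
            have hiu : i < used.length := by omega
            refine ⟨i, 0, by rw [if_pos ha], le_refl _, hj, ?_, ?_⟩
            · simp only [scanAdjA]
              rw [if_pos ha]
            · simp only [List.eraseIdx_cons_zero]
              have hset : (used.set i true).getD i false = true := by
                rw [List.getD, List.getElem?_set_self hiu]; rfl
              rw [remFrom_skip _ (used.set i true) _ hj hset,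
                remFrom_set_lt _ _ _ _ (by omega)]
          · rw [if_neg ha]
            simp only [scanAdjA, ha, if_neg (by simp : ¬ (false = true))]
            rcases ih (i + 1) (by omega) with ⟨h1, h2⟩ | ⟨k, pos, h1, hk1, hk2, h3, h4⟩
            · left
              refine ⟨h1, ?_⟩
              rw [h2]; rfl
            · right
              refine ⟨k, pos + 1, h1, by omega, hk2, by rw [h3]; rfl, ?_⟩
              rw [List.eraseIdx_cons_succ, h4,
                remFrom_cons _ (used.set k true) _ hj ((getD_set_ne used k i (by omega)).trans hu)]

-- pass correspondence: B's marking pass equals (the list part of) A's popping pass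
theorem pass_corr (lst : List (Int × Int × Int × Int)) (used : List Bool) (j : Nat)
    (hlen : used.length = lst.length) :
    passBgo lst used (List.range' j (lst.length - j)) =
      (passA (lst.length - j) (remFrom lst used j)).1 := by
  induction hi : lst.length - j generalizing used j with
  | zero =>
      rw [List.range'_zero, remFrom_stop _ _ _ (by omega)]
      rfl
  | succ m ih =>
      have hj : j < lst.length := by omega
      have hm : lst.length - (j + 1) = m := by omega
      rw [List.range'_succ]
      simp only [passBgo]
      cases hu : used.getD j false with
      | true =>
          rw [if_pos rfl, remFrom_skip _ _ _ hj hu, ih used (j + 1) hlen (by omega),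
            passA_congr m (m + 1) _ (by have := remFrom_len_le lst used (j + 1); omega)
              (by have := remFrom_len_le lst used (j + 1); omega)]
      | false =>
          rw [if_neg (by simp : ¬ (false = true)), remFrom_cons _ _ _ hj hu]
          rcases scan_corr lst used (lst.getD j (0, 0, 0, 0)) (j + 1) hlen with
            ⟨h1, h2⟩ | ⟨k, pos, h1, hk1, hk2, h3, h4⟩
          · rw [hm] at h1
            simp only [h1, passA, h2]
            rw [ih used (j + 1) hlen (by omega)]
          · rw [hm] at h1
            simp only [h1, passA, h3]
            rw [h4, ih (used.set k true) (j + 1) (by rw [List.length_set]; exact hlen) (by omega)]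

theorem remFrom_replicate (lst : List (Int × Int × Int × Int)) (j : Nat) :
    remFrom lst (List.replicate lst.length false) j = lst.drop j := by
  induction hi : lst.length - j generalizing j with
  | zero =>
      rw [remFrom_stop _ _ _ (by omega), List.drop_eq_nil_of_le (by omega)]
  | succ m ih =>
      have hj : j < lst.length := by omega
      have hrep : (List.replicate lst.length false).getD j false = false := by
        rw [List.getD, List.getElem?_replicate_of_lt hj]; rfl
      rw [remFrom_cons _ _ _ hj hrep, ih (j + 1) (by omega),
        List.getD, List.getElem?_eq_getElem hj, Option.getD_some,
        ← List.getElem_cons_drop hj]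

theorem passB_eq (lst : List (Int × Int × Int × Int)) :
    passB lst = (passA lst.length lst).1 := by
  rw [passB, List.range_eq_range']
  have h0 : List.range' 0 lst.length = List.range' 0 (lst.length - 0) := by simp
  rw [h0, pass_corr _ _ _ (List.length_replicate ..), remFrom_replicate, List.drop_zero]
  simp

theorem loop_eq (fuel : Nat) : ∀ wl : List (Int × Int × Int × Int),
    wl.length ≤ fuel → loopA fuel wl = loopB fuel wl := by
  induction fuel with
  | zero => intro wl h; rfl
  | succ fuel ih =>
      intro wl h
      simp only [loopA, loopB]
      by_cases h1 : wl.length ≤ 1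
      · simp only [if_pos h1]
      · simp only [if_neg h1, passB_eq]
        match hp : passA wl.length wl with
        | (nl, true) =>
            have hlt : nl.length < wl.length := by
              have := passA_true_lt wl.length wl (le_refl _) (by rw [hp])
              rw [hp] at this; exact this
            rw [if_neg (show ¬ ((nl, true).1.length = wl.length) from Nat.ne_of_lt hlt)]
            exact ih nl (by omega)
        | (nl, false) =>
            have heq : nl = wl := by
              have := passA_false_eq wl.length wl (le_refl _) (by rw [hp])
              rw [hp] at this; exact this
            rw [if_pos (show (nl, false).1.length = wl.length by simp [heq])]
            exact heq

-- ===== VERDICT (by name: the statement is the Claim_ definition above) =====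
theorem rectangle_merge_all_spec : Claim_equal_rectangle_merge_all := by
  intro rects _
  unfold Spec_rectangle_merge_all rectangle_merge_all rectangle_merge_all_alt
  by_cases h : rects.length ≤ 1
  · rw [if_pos h]
    rcases rects with _ | ⟨a, _ | ⟨b, t⟩⟩
    · rfl
    · simp [loopB]
    · simp at h
  · rw [if_neg h]
    exact loop_eq rects.length rects (le_refl _)
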